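-- pv_equiv track=rewrite | github.com/gun9311/programmers | baekjoon/programmers/etc/dressing.py | solution
-- ===== SOURCE A (Python) =====
-- def solution(bandage, health, attacks):
--     answer = -1
--     max_health = health
--     time = attacks[-1][0]+1
--     recovery = 0
--
--     for i in range(1,time) :
--         attack = False
--         for j in range(len(attacks)) :
--             if attacks[j][0] == i :
--                 health -= attacks[j][1]
--                 recovery = 0
--                 attack =True
--                 break
--         if attack == True :
--             continue
--         recovery += 1
--         if recovery == bandage[0] :
--             if health + bandage[1] + bandage[2] <= max_health :
--                 health += bandage[1] + bandage[2]
--             else :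
--                 health = max_health
--             recovery = 0
--         else:
--             if health + bandage[1] <= max_health :
--                 health += bandage[1]
--             else :
--                 health = max_health
--     if health <=0 :
--         return answer
--     return health
-- ===== SOURCE B (Python) =====
-- def solution(bandage, health, attacks):
--     t, x, y = bandage[0], bandage[1], bandage[2]
--     max_health = health
--     T = attacks[-1][0]
--     times = sorted(set(at for at, _ in attacks if 1 <= at <= T))
--     dmg = {}
--     for at, d in attacks:
--         dmg.setdefault(at, d)
--
--     def heal(h, g):
--         # g consecutive healing seconds starting with a fresh recovery counter:
--         # the bonus fires on every t-th second, i.e. when c % t == 0 (t >= 1)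
--         for c in range(1, g + 1):
--             gain = x + y if t >= 1 and c % t == 0 else x
--             h = h + gain if h + gain <= max_health else max_health
--         return h
--
--     prev = 0
--     for e in times:
--         health = heal(health, e - prev - 1) - dmg[e]
--         prev = e
--     return health if health > 0 else -1
-- ===== Notes on version B (the rewrite author's own statement) =====
-- stated objective: alternative
-- what changed: B abandons the tick-by-tick event-detection simulation: it sorts the distinct in-range attack times once and folds over attacks only, healing each inter-attack gap with a self-contained helper whose bonus condition is arithmetic (c % t == 0) instead of A's threaded recovery counter reset by per-tick attack scans.
-- outside the precondition, e.g. on solution([], 5, [(1, 2), (2, 3)]): A returns -1, B raises IndexError; on solution([], 5, [(0, 3)]): A returns 5, B raises IndexError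
import Mathlib
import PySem

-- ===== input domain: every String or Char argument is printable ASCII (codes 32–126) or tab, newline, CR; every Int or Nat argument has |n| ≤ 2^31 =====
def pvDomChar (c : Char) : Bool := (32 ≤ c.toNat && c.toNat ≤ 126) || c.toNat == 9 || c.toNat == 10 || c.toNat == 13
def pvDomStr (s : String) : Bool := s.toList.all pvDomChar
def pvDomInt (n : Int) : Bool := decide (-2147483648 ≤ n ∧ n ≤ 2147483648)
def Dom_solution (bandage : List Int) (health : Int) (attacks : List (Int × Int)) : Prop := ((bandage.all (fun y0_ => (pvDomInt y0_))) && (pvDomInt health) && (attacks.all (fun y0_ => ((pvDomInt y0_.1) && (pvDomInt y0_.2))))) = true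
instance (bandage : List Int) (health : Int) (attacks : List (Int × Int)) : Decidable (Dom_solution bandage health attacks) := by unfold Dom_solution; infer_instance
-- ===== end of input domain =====

-- B replaces A's tick-by-tick simulation (which rescans the attack list at every timestep and
-- threads a resettable recovery counter) by a fold over the sorted distinct attack times only,
-- healing each inter-attack gap with a helper whose bonus test is arithmetic (c % t == 0).

-- ===== PORT A =====
-- one timestep of A's loop body; the inner 'for j … break' is the first match, i.e. find?
def solutionStepA (bandage : List Int) (maxHealth : Int) (attacks : List (Int × Int))
    (st : Int × Int) (i : Int) : Int × Int :=
  match attacks.find? (fun a => a.1 == i) with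
  | some a => (st.1 - a.2, 0)
  | none =>
    let recovery := st.2 + 1
    if recovery = PySem.List.pyGetD bandage 0 0 then
      (if st.1 + PySem.List.pyGetD bandage 1 0 + PySem.List.pyGetD bandage 2 0 ≤ maxHealth then
          st.1 + PySem.List.pyGetD bandage 1 0 + PySem.List.pyGetD bandage 2 0
        else maxHealth, 0)
    else
      (if st.1 + PySem.List.pyGetD bandage 1 0 ≤ maxHealth then
          st.1 + PySem.List.pyGetD bandage 1 0
        else maxHealth, recovery)

def solution (bandage : List Int) (health : Int) (attacks : List (Int × Int)) : Int :=
  let maxHealth := health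
  let time := (PySem.List.pyGetD attacks (-1) (0, 0)).1 + 1   -- attacks[-1][0]+1; default unreachable under Pre_
  let fin := (PySem.List.pyRange 1 time 1).foldl (solutionStepA bandage maxHealth attacks) (health, 0)
  if fin.1 ≤ 0 then -1 else fin.1

-- ===== PORT B =====
-- first-occurrence damage per time ('dmg.setdefault(at, d)')
def buildDmg (attacks : List (Int × Int)) : PySem.Dict Int Int :=
  attacks.foldl (fun d p => d.setdefault p.1 p.2) PySem.Dict.empty

-- one healing second: c is its 1-based position in the gap; bonus iff t >= 1 and c % t == 0
def healStep (t x y maxHealth : Int) (h c : Int) : Int :=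
  let gain := if 1 ≤ t ∧ PySem.Int.mod c t = 0 then x + y else x
  if h + gain ≤ maxHealth then h + gain else maxHealth

-- heal(h, g): g consecutive healing seconds starting with a fresh recovery counter
def healB (t x y maxHealth : Int) (h g : Int) : Int :=
  (PySem.List.pyRange 1 (g + 1) 1).foldl (healStep t x y maxHealth) h

-- one event in B's fold over the sorted attack times; state = (health, prev)
def solutionStepB (t x y maxHealth : Int) (dmg : PySem.Dict Int Int)
    (st : Int × Int) (e : Int) : Int × Int :=
  (healB t x y maxHealth st.1 (e - st.2 - 1) - ((dmg.get? e).getD 0), e)   -- dmg[e]: key always present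

def solution_alt (bandage : List Int) (health : Int) (attacks : List (Int × Int)) : Int :=
  let t := PySem.List.pyGetD bandage 0 0       -- bandage[0]; default unreachable under Pre_
  let x := PySem.List.pyGetD bandage 1 0
  let y := PySem.List.pyGetD bandage 2 0
  let T := (PySem.List.pyGetD attacks (-1) (0, 0)).1   -- attacks[-1][0]
  let times := PySem.List.sorted
    (PySem.Set.ofList ((attacks.filter (fun a => decide (1 ≤ a.1) && decide (a.1 ≤ T))).map (·.1)))
    (fun k => k) false
  let dmg := buildDmg attacks
  let fin := times.foldl (solutionStepB t x y health dmg) (health, 0)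
  if fin.1 > 0 then fin.1 else -1

-- ===== PRECONDITION & SPEC =====
-- Pre_ excludes empty attacks (A raises IndexError on attacks[-1]) and bandage with fewer than
-- 3 entries (B reads bandage[0..2] upfront and raises; A raises too on any healing timestep,
-- but returns when every simulated timestep is an attack or the timeline is empty).
def Pre_solution (bandage : List Int) (health : Int) (attacks : List (Int × Int)) : Prop :=
  attacks ≠ [] ∧ 3 ≤ bandage.length
instance (bandage : List Int) (health : Int) (attacks : List (Int × Int)) : Decidable (Pre_solution bandage health attacks) := by unfold Pre_solution; infer_instance

def pvWitness_solution : List Int × Int × (List (Int × Int)) := ([3, 2, 7], 30, [(2, 10), (5, 8)])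

def Spec_solution (bandage : List Int) (health : Int) (attacks : List (Int × Int)) (out : Int) : Prop := out = solution_alt bandage health attacks
instance (bandage : List Int) (health : Int) (attacks : List (Int × Int)) (out : Int) : Decidable (Spec_solution bandage health attacks out) := by unfold Spec_solution; infer_instance

-- ===== CLAIM (what is proved, stated in full; the proofs are below) =====
def Claim_equal_solution : Prop := ∀ (bandage : List Int) (health : Int) (attacks : List (Int × Int)), Dom_solution bandage health attacks → Pre_solution bandage health attacks → Spec_solution bandage health attacks (solution bandage health attacks)

-- ===== LEMMAS AND PROOFS =====

-- setdefault-built dict lookup = first match in the list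
theorem get?_buildDmg_aux (attacks : List (Int × Int)) (d : PySem.Dict Int Int) (k : Int) :
    (attacks.foldl (fun d p => d.setdefault p.1 p.2) d).get? k =
      ((d.get? k).orElse (fun _ => (attacks.find? (fun a => a.1 == k)).map (·.2))) := by
  induction attacks generalizing d with
  | nil => cases h : d.get? k <;> simp [h]
  | cons p rest ih =>
    simp only [List.foldl_cons, List.find?_cons]
    rw [ih]
    by_cases hpk : p.1 = k
    · subst hpk
      rw [PySem.Dict.get?_setdefault_self]
      cases h : d.get? p.1 <;> simp [h]
    · rw [PySem.Dict.get?_setdefault_of_ne d p.2 (fun h => hpk h.symm)]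
      have hb : (p.1 == k) = false := by simp [hpk]
      simp [hb]

theorem get?_buildDmg (attacks : List (Int × Int)) (k : Int) :
    (buildDmg attacks).get? k = (attacks.find? (fun a => a.1 == k)).map (·.2) := by
  unfold buildDmg
  rw [get?_buildDmg_aux]
  simp

-- A's recovery counter after g consecutive healing seconds (fresh start)
def recOf (t : Int) (g : Nat) : Int := if 1 ≤ t then (g : Int) % t else (g : Int)

theorem emod_succ (t g : Int) :
    (g + 1) % t = (g % t + 1) % t := by
  conv_lhs => rw [← Int.mul_ediv_add_emod g t]
  rw [show t * (g / t) + g % t + 1 = (g % t + 1) + t * (g / t) by ring,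
      Int.add_mul_emod_self_left]

-- a whole healing gap: A's tick loop over the timeline equals B's heal fold, and A's
-- recovery counter after g fresh healing seconds is g % t (t ≥ 1) resp. g
theorem heal_stretch (bandage : List Int) (mh : Int) (attacks : List (Int × Int)) (g : Nat) :
    ∀ (prev h : Int),
    (∀ c : Int, 1 ≤ c → c ≤ (g : Int) → attacks.find? (fun a => a.1 == prev + c) = none) →
    (PySem.List.pyRange (prev + 1) (prev + 1 + (g : Int)) 1).foldl
        (solutionStepA bandage mh attacks) (h, 0) =
      ((PySem.List.pyRange 1 (1 + (g : Int)) 1).foldl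
        (healStep (PySem.List.pyGetD bandage 0 0) (PySem.List.pyGetD bandage 1 0)
          (PySem.List.pyGetD bandage 2 0) mh) h,
       recOf (PySem.List.pyGetD bandage 0 0) g) := by
  induction g with
  | zero =>
    intro prev h _
    rw [PySem.List.pyRange_one_eq_nil (by omega), PySem.List.pyRange_one_eq_nil (by omega)]
    simp [recOf]
  | succ g ih =>
    intro prev h hno
    have hc1 : (((g : Nat) + 1 : Nat) : Int) = (g : Int) + 1 := by push_cast; ring
    rw [hc1]
    rw [show prev + 1 + ((g : Int) + 1) = (prev + 1 + (g : Int)) + 1 by ring,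
        PySem.List.pyRange_one_succ_right (by omega),
        show (1 : Int) + ((g : Int) + 1) = (1 + (g : Int)) + 1 by ring,
        PySem.List.pyRange_one_succ_right (by omega)]
    rw [List.foldl_append, List.foldl_append]
    rw [ih prev h (fun c h1 h2 => hno c h1 (by omega))]
    simp only [List.foldl_cons, List.foldl_nil]
    have hfind : attacks.find? (fun a => a.1 == prev + 1 + (g : Int)) = none := by
      have := hno ((g : Int) + 1) (by omega) (by omega)
      rwa [show prev + ((g : Int) + 1) = prev + 1 + (g : Int) by ring] at this
    set t := PySem.List.pyGetD bandage 0 0 with htdef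
    set x := PySem.List.pyGetD bandage 1 0 with hxdef
    set y := PySem.List.pyGetD bandage 2 0 with hydef
    simp only [solutionStepA, hfind]
    rw [← htdef, ← hxdef, ← hydef]
    by_cases ht : 1 ≤ t
    · have ht0 : (0 : Int) < t := by omega
      have hm0 : (0 : Int) ≤ (g : Int) % t := Int.emod_nonneg _ (by omega)
      have hmlt : (g : Int) % t < t := Int.emod_lt_of_pos _ ht0
      have hmod : PySem.Int.mod (1 + (g : Int)) t = ((g : Int) + 1) % t := by
        rw [PySem.Int.mod_eq_emod_of_pos ht0, add_comm]
      have hsucc : ((g : Int) + 1) % t = ((g : Int) % t + 1) % t := emod_succ t _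
      simp only [recOf, if_pos ht, healStep]
      by_cases hb : (g : Int) % t = t - 1
      · -- bonus second
        have hz : ((g : Int) + 1) % t = 0 := by
          rw [hsucc, hb, show t - 1 + 1 = t by ring, Int.emod_self]
        have hz' : ((((g : Nat) + 1 : Nat)) : Int) % t = 0 := by push_cast; exact hz
        rw [if_pos (by omega : (g : Int) % t + 1 = t), hmod, hz,
            if_pos (⟨ht, rfl⟩ : 1 ≤ t ∧ (0 : Int) = 0), hz', add_assoc]
      · -- ordinary second
        have hnz : ((g : Int) + 1) % t = (g : Int) % t + 1 := by
          rw [hsucc]; exact Int.emod_eq_of_lt (by omega) (by omega)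
        have hnz' : ((((g : Nat) + 1 : Nat)) : Int) % t = (g : Int) % t + 1 := by
          push_cast; exact hnz
        rw [if_neg (by omega : ¬ ((g : Int) % t + 1 = t)), hmod, hnz,
            if_neg (by omega : ¬ (1 ≤ t ∧ (g : Int) % t + 1 = 0)), hnz']
    · -- t ≤ 0: the bonus never fires
      have ht' : t ≤ 0 := by omega
      simp only [recOf, if_neg ht, healStep]
      rw [if_neg (by omega : ¬ ((g : Int) + 1 = t)),
          if_neg (show ¬ (1 ≤ t ∧ PySem.Int.mod (1 + (g : Int)) t = 0) from fun hh => ht hh.1),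
          hc1]

-- the main decomposition: A's fold over the whole remaining timeline (prev, T] equals B's fold
-- over the sorted list of the event times in (prev, T]
theorem main_fold (bandage : List Int) (mh : Int) (attacks : List (Int × Int)) (T : Int)
    (hEvT : (attacks.find? (fun a => a.1 == T)).isSome = true) :
    ∀ (es : List Int), List.Pairwise (· < ·) es → ∀ (prev h : Int),
    (∀ e ∈ es, prev < e ∧ e ≤ T) →
    (∀ i, prev < i → i ≤ T → ((attacks.find? (fun a => a.1 == i)).isSome = true ↔ i ∈ es)) →
    ((PySem.List.pyRange (prev + 1) (T + 1) 1).foldl (solutionStepA bandage mh attacks) (h, 0)).1 =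
      (es.foldl (solutionStepB (PySem.List.pyGetD bandage 0 0) (PySem.List.pyGetD bandage 1 0)
        (PySem.List.pyGetD bandage 2 0) mh (buildDmg attacks)) (h, prev)).1 := by
  intro es
  induction es with
  | nil =>
    intro _ prev h _ hmem
    have hTle : T ≤ prev := by
      by_contra hlt
      exact (List.not_mem_nil).elim ((hmem T (by omega) le_rfl).mp hEvT)
    rw [PySem.List.pyRange_one_eq_nil (by omega)]
    simp
  | cons e rest ih =>
    intro hpw prev h hbnd hmem
    have hpe : prev < e := (hbnd e (List.mem_cons_self)).1
    have heT : e ≤ T := (hbnd e (List.mem_cons_self)).2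
    have hrest_gt : ∀ e' ∈ rest, e < e' := fun e' he' => (List.pairwise_cons.mp hpw).1 e' he'
    -- split the timeline at e
    rw [PySem.List.pyRange_one_append (prev + 1) (e + 1) (T + 1) (by omega) (by omega),
        List.foldl_append]
    -- the chunk (prev, e] : a healing gap of g seconds followed by the attack at e
    set g : Nat := (e - prev - 1).toNat with hgdef
    have hg : (g : Int) = e - prev - 1 := by omega
    rw [show e + 1 = (prev + 1 + (g : Int)) + 1 by omega,
        PySem.List.pyRange_one_succ_right (by omega), List.foldl_append]
    have hnone : ∀ c : Int, 1 ≤ c → c ≤ (g : Int) →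
        attacks.find? (fun a => a.1 == prev + c) = none := by
      intro c h1 h2
      have hic : prev < prev + c ∧ prev + c ≤ T := by omega
      by_contra hne
      have hs : (attacks.find? (fun a => a.1 == prev + c)).isSome = true := by
        cases hf : attacks.find? (fun a => a.1 == prev + c) with
        | none => exact absurd hf hne
        | some a => rfl
      rcases (hmem _ hic.1 hic.2).mp hs with hmm
      rcases List.mem_cons.mp hmm with h' | h'
      · omega
      · have := hrest_gt _ h'; omega
    rw [heal_stretch bandage mh attacks g prev h hnone]
    simp only [List.foldl_cons]
    -- the attack at e
    have hse : (attacks.find? (fun a => a.1 == e)).isSome = true :=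
      (hmem e hpe heT).mpr List.mem_cons_self
    obtain ⟨a, hfa⟩ := Option.isSome_iff_exists.mp hse
    have hstep : solutionStepA bandage mh attacks
        ((PySem.List.pyRange 1 (1 + (g : Int)) 1).foldl
          (healStep (PySem.List.pyGetD bandage 0 0) (PySem.List.pyGetD bandage 1 0)
            (PySem.List.pyGetD bandage 2 0) mh) h,
          recOf (PySem.List.pyGetD bandage 0 0) g) (prev + 1 + (g : Int)) =
        ((PySem.List.pyRange 1 (1 + (g : Int)) 1).foldl
          (healStep (PySem.List.pyGetD bandage 0 0) (PySem.List.pyGetD bandage 1 0)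
            (PySem.List.pyGetD bandage 2 0) mh) h - a.2, 0) := by
      have he' : prev + 1 + (g : Int) = e := by omega
      rw [he']
      simp [solutionStepA, hfa]
    rw [hstep]
    -- B's step at e
    have hB : solutionStepB (PySem.List.pyGetD bandage 0 0) (PySem.List.pyGetD bandage 1 0)
        (PySem.List.pyGetD bandage 2 0) mh (buildDmg attacks) (h, prev) e =
        ((PySem.List.pyRange 1 (1 + (g : Int)) 1).foldl
          (healStep (PySem.List.pyGetD bandage 0 0) (PySem.List.pyGetD bandage 1 0)
            (PySem.List.pyGetD bandage 2 0) mh) h - a.2, e) := by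
      simp only [solutionStepB, healB, get?_buildDmg, hfa, Option.map_some, Option.getD_some]
      rw [show e - prev - 1 + 1 = 1 + (g : Int) by omega]
    rw [hB]
    -- recurse on the rest of the events
    rw [show prev + 1 + (g : Int) + 1 = e + 1 by omega]
    exact ih (List.pairwise_cons.mp hpw).2 e _
      (fun e' he' => ⟨hrest_gt e' he', (hbnd e' (List.mem_cons_of_mem _ he')).2⟩)
      (fun i hi1 hi2 => by
        rw [hmem i (by omega) hi2, List.mem_cons]
        constructor
        · rintro (h' | h')
          · omega
          · exact h'
        · exact fun h' => Or.inr h')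

-- ===== VERDICT (by name: the statement is the Claim_ definition above) =====
theorem solution_spec : Claim_equal_solution := by
  intro bandage health attacks _ hpre
  obtain ⟨hne, _⟩ := hpre
  unfold Spec_solution solution solution_alt
  simp only []
  set T : Int := (PySem.List.pyGetD attacks (-1) (0, 0)).1 with hTdef
  have hlast : PySem.List.pyGetD attacks (-1) ((0 : Int), (0 : Int)) = attacks.getLast hne :=
    PySem.List.pyGetD_neg_one attacks (0, 0) hne
  have hEvT : (attacks.find? (fun a => a.1 == T)).isSome = true := by
    rw [List.find?_isSome]
    exact ⟨attacks.getLast hne, List.getLast_mem hne, by rw [hTdef, hlast]; simp⟩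
  set S : List Int :=
    (attacks.filter (fun a => decide (1 ≤ a.1) && decide (a.1 ≤ T))).map (·.1) with hSdef
  set times : List Int := PySem.List.sorted (PySem.Set.ofList S) (fun k => k) false
  have hmemS : ∀ i : Int, i ∈ times ↔ ∃ a ∈ attacks, a.1 = i ∧ 1 ≤ i ∧ i ≤ T := by
    intro i
    rw [PySem.List.mem_sorted, PySem.Set.mem_ofList, hSdef, List.mem_map]
    constructor
    · rintro ⟨a, ha, rfl⟩
      rcases List.mem_filter.mp ha with ⟨ham, hcond⟩
      simp only [Bool.and_eq_true, decide_eq_true_eq] at hcond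
      exact ⟨a, ham, rfl, hcond.1, hcond.2⟩
    · rintro ⟨a, ham, rfl, h1, h2⟩
      exact ⟨a, List.mem_filter.mpr ⟨ham, by simp [h1, h2]⟩, rfl⟩
  have hpw : List.Pairwise (· < ·) times := PySem.List.sorted_ofList_pairwise_lt S
  have hbnd : ∀ e ∈ times, (0 : Int) < e ∧ e ≤ T := by
    intro e he
    rcases (hmemS e).mp he with ⟨_, _, _, h1, h2⟩
    exact ⟨by omega, h2⟩
  have hmem : ∀ i : Int, 0 < i → i ≤ T →
      ((attacks.find? (fun a => a.1 == i)).isSome = true ↔ i ∈ times) := by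
    intro i h1 h2
    rw [List.find?_isSome, hmemS]
    constructor
    · rintro ⟨a, ham, hpa⟩
      exact ⟨a, ham, by simpa using hpa, by omega, h2⟩
    · rintro ⟨a, ham, rfl, _, _⟩
      exact ⟨a, ham, by simp⟩
  have hmain := main_fold bandage health attacks T hEvT times hpw 0 health hbnd hmem
  simp only [zero_add] at hmain
  rw [hmain]
  split_ifs <;> omega
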